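-- pv_equiv track=rewrite | github.com/starhaz3-ship-it/star-polymarket | backtest_skew_v2.py | consecutive_direction
-- ===== SOURCE A (Python) =====
-- def consecutive_direction(closes, max_look=10):
--     """Count consecutive up or down closes. Positive = consecutive ups."""
--     if len(closes) < 3: return 0
--     count = 0
--     for i in range(len(closes)-1, 0, -1):
--         if closes[i] > closes[i-1]:
--             if count >= 0: count += 1
--             else: break
--         elif closes[i] < closes[i-1]:
--             if count <= 0: count -= 1
--             else: break
--         if abs(count) >= max_look: break
--     return count
-- ===== SOURCE B (Python) =====
-- def consecutive_direction(closes, max_look=10):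
--     """Count consecutive up or down closes. Positive = consecutive ups."""
--     if len(closes) < 3:
--         return 0
--     signs = [(b > a) - (b < a) for a, b in zip(closes, closes[1:])]
--     nz = [s for s in signs if s != 0]
--     if not nz:
--         return 0
--     last = nz[-1]
--     run = 0
--     for s in reversed(nz):
--         if s != last or run >= max_look:
--             break
--         run += 1
--     return last * run
-- ===== Notes on version B (the rewrite author's own statement) =====
-- stated objective: alternative
-- what changed: A walks backwards over indices with one signed accumulator, break statements and an in-loop cap check; B first materialises the adjacent-difference sign list, filters out the flats, and then counts the trailing run of equal signs capped at max_look, returning sign*run.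
-- outside the precondition, e.g. on consecutive_direction([1, 2, 3], 0): A returns 1, B returns 0
import Mathlib
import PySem

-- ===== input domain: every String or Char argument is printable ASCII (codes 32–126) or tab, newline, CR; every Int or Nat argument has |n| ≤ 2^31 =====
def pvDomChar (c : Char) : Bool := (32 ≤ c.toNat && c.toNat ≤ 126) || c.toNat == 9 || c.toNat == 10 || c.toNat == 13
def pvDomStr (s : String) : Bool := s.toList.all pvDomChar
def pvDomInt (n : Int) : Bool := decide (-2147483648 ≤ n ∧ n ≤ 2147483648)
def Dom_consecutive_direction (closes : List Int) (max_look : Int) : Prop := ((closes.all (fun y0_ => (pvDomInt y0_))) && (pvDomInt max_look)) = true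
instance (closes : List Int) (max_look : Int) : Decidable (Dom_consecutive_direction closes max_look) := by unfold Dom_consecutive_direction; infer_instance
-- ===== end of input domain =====

-- B replaces A's backward index loop (signed accumulator, breaks, in-loop cap check) by two
-- passes: the adjacent-difference sign list, then a capped trailing-run count over the
-- non-flat signs; objective: alternative (same O(n) cost).


-- ===== PORT A =====
-- A's backward loop 'for i in range(len(closes)-1, 0, -1)' with its break statements; the
-- indices i and i-1 are always in range on that range, so closes[i] is ported as pyGetD
-- (exact there: the IndexError case is unreachable).
def cdGo (closes : List Int) (max_look : Int) : List Int → Int → Int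
  | [], count => count
  | i :: is, count =>
      let ci := PySem.List.pyGetD closes i 0
      let cp := PySem.List.pyGetD closes (i - 1) 0
      if ci > cp then
        if count ≥ 0 then
          let c := count + 1
          if |c| ≥ max_look then c else cdGo closes max_look is c
        else count
      else if ci < cp then
        if count ≤ 0 then
          let c := count - 1
          if |c| ≥ max_look then c else cdGo closes max_look is c
        else count
      else
        if |count| ≥ max_look then count else cdGo closes max_look is count

def consecutive_direction (closes : List Int) (max_look : Int) : Int :=
  if (closes.length : Int) < 3 then 0
  else cdGo closes max_look (PySem.List.pyRange ((closes.length : Int) - 1) 0 (-1)) 0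

-- ===== PORT B =====
-- Python's '(b > a) - (b < a)'
def cdSign (a b : Int) : Int := (if b > a then 1 else 0) - (if b < a then 1 else 0)

-- 'for s in reversed(nz): if s != last or run >= max_look: break; run += 1'
def cdRun (last max_look : Int) : List Int → Int → Int
  | [], run => run
  | s :: ss, run => if s ≠ last ∨ run ≥ max_look then run else cdRun last max_look ss (run + 1)

def consecutive_direction_alt (closes : List Int) (max_look : Int) : Int :=
  if (closes.length : Int) < 3 then 0
  else
    let signs := (closes.zip (PySem.List.slice closes (some 1) none)).map (fun p => cdSign p.1 p.2)
    let nz := signs.filter (fun s => s != 0)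
    match nz.getLast? with
    | none => 0
    | some last => last * cdRun last max_look nz.reverse 0

-- ===== PRECONDITION & SPEC =====
-- Pre_ excludes non-positive max_look, a degenerate lookback cap nobody specifies: there A's
-- cap check fires after the very first comparison (returning the sign of the last move) while
-- B's cap of ≤ 0 counts nothing and returns 0 — both values are defensible, neither intended.
def Pre_consecutive_direction (closes : List Int) (max_look : Int) : Prop := 1 ≤ max_look
instance (closes : List Int) (max_look : Int) : Decidable (Pre_consecutive_direction closes max_look) := by unfold Pre_consecutive_direction; infer_instance
def pvWitness_consecutive_direction : List Int × Int := ([5, 3, 4, 6, 6, 7], 3)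

def Spec_consecutive_direction (closes : List Int) (max_look : Int) (out : Int) : Prop := out = consecutive_direction_alt closes max_look
instance (closes : List Int) (max_look : Int) (out : Int) : Decidable (Spec_consecutive_direction closes max_look out) := by unfold Spec_consecutive_direction; infer_instance

-- ===== CLAIM (what is proved, stated in full; the proofs are below) =====
def Claim_equal_consecutive_direction : Prop := ∀ (closes : List Int) (max_look : Int), Dom_consecutive_direction closes max_look → Pre_consecutive_direction closes max_look → Spec_consecutive_direction closes max_look (consecutive_direction closes max_look)

-- ===== LEMMAS AND PROOFS =====

-- Proof-side abstraction of A's loop: the same loop read off a list of diff signs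
-- (1, -1 or 0) instead of pairs of indices into closes.
def cdAbs (ml : Int) : List Int → Int → Int
  | [], c => c
  | s :: ss, c =>
      if s = 1 then
        (if c ≥ 0 then (if |c + 1| ≥ ml then c + 1 else cdAbs ml ss (c + 1)) else c)
      else if s = -1 then
        (if c ≤ 0 then (if |c - 1| ≥ ml then c - 1 else cdAbs ml ss (c - 1)) else c)
      else
        (if |c| ≥ ml then c else cdAbs ml ss c)

-- What B computes once the flats are dropped, as a function of the reversed non-flat signs.
def cdTail (ml : Int) : List Int → Int
  | [] => 0
  | s :: t => s * cdRun s ml (s :: t) 0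

def cdSigns (closes : List Int) : List Int :=
  (closes.zip (PySem.List.slice closes (some 1) none)).map (fun p => cdSign p.1 p.2)

lemma cdSigns_length (closes : List Int) : (cdSigns closes).length = closes.length - 1 := by
  simp [cdSigns, PySem.List.slice_from_one]

lemma cdSigns_getElem (closes : List Int) (j : Nat) (hj : j < (cdSigns closes).length) :
    (cdSigns closes)[j] = cdSign (closes[j]'(by have := cdSigns_length closes; omega))
      (closes[j+1]'(by have := cdSigns_length closes; omega)) := by
  simp [cdSigns, PySem.List.slice_from_one] at hj ⊢

lemma cdSigns_small (closes : List Int) : ∀ s ∈ cdSigns closes, s = 1 ∨ s = -1 ∨ s = 0 := by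
  intro s hs
  simp only [cdSigns, List.mem_map] at hs
  obtain ⟨p, _, rfl⟩ := hs
  unfold cdSign
  split_ifs <;> simp

-- cdRun returns its accumulator as soon as the cap is reached.
lemma cdRun_of_cap (last ml : Int) (l : List Int) (run : Int) (h : run ≥ ml) :
    cdRun last ml l run = run := by
  cases l with
  | nil => rfl
  | cons s ss => rw [cdRun, if_pos (Or.inr h)]

-- Running state: once A's count is s*k with 1 ≤ k < ml, the rest of A's loop computes
-- s times B's capped trailing-run count.
lemma cdAbs_run (ml : Int) (rs : List Int) (hS : ∀ s ∈ rs, s = 1 ∨ s = -1 ∨ s = 0)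
    (s : Int) (hs : s = 1 ∨ s = -1) :
    ∀ k : Int, 1 ≤ k → k < ml →
      cdAbs ml rs (s * k) = s * cdRun s ml (rs.filter (fun x => x != 0)) k := by
  induction rs with
  | nil => intro k hk1 hk2; simp [cdAbs, cdRun]
  | cons t rs ih =>
    intro k hk1 hk2
    have hS' : ∀ x ∈ rs, x = 1 ∨ x = -1 ∨ x = 0 := fun x hx => hS x (List.mem_cons_of_mem _ hx)
    have ht := hS t (List.mem_cons_self ..)
    have habs1 : ∀ x : Int, 0 ≤ x → |x| = x := fun x hx => abs_of_nonneg hx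
    have habs2 : ∀ x : Int, x ≤ 0 → |x| = -x := fun x hx => abs_of_nonpos hx
    rcases ht with rfl | rfl | rfl
    · -- t = 1
      rw [List.filter_cons_of_pos (by norm_num), cdAbs, cdRun]
      rcases hs with rfl | rfl
      · rw [if_pos rfl, if_pos (by omega : (1:Int) * k ≥ 0),
          if_neg (by omega : ¬((1:Int) ≠ 1 ∨ k ≥ ml))]
        by_cases hcap : k + 1 ≥ ml
        · rw [if_pos (by rw [habs1 _ (by omega)]; omega), cdRun_of_cap _ _ _ _ (by omega)]
          ring
        · rw [if_neg (by rw [habs1 _ (by omega)]; omega),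
            show (1:Int) * k + 1 = 1 * (k + 1) by ring, ih hS' (k+1) (by omega) (by omega)]
      · rw [if_pos rfl, if_neg (by omega : ¬((-1:Int) * k ≥ 0)),
          if_pos (by omega : (1:Int) ≠ -1 ∨ k ≥ ml)]
    · -- t = -1
      rw [List.filter_cons_of_pos (by norm_num), cdAbs, cdRun]
      rcases hs with rfl | rfl
      · rw [if_neg (by norm_num), if_pos rfl, if_neg (by omega : ¬((1:Int) * k ≤ 0)),
          if_pos (by omega : (-1:Int) ≠ 1 ∨ k ≥ ml)]
      · rw [if_neg (by norm_num), if_pos rfl, if_pos (by omega : (-1:Int) * k ≤ 0),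
          if_neg (by omega : ¬((-1:Int) ≠ -1 ∨ k ≥ ml))]
        by_cases hcap : k + 1 ≥ ml
        · rw [if_pos (by rw [habs2 _ (by omega)]; omega), cdRun_of_cap _ _ _ _ (by omega)]
          ring
        · rw [if_neg (by rw [habs2 _ (by omega)]; omega),
            show (-1:Int) * k - 1 = -1 * (k + 1) by ring, ih hS' (k+1) (by omega) (by omega)]
    · -- t = 0
      rw [List.filter_cons_of_neg (by norm_num), cdAbs,
        if_neg (by norm_num), if_neg (by norm_num)]
      rcases hs with rfl | rfl
      · rw [if_neg (by rw [habs1 _ (by omega)]; omega)]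
        exact ih hS' k hk1 hk2
      · rw [if_neg (by rw [habs2 _ (by omega)]; omega)]
        exact ih hS' k hk1 hk2

-- Start state: from count = 0, A's loop computes B's sign-times-trailing-run value.
lemma cdAbs_start (ml : Int) (hml : 1 ≤ ml) (rs : List Int)
    (hS : ∀ s ∈ rs, s = 1 ∨ s = -1 ∨ s = 0) :
    cdAbs ml rs 0 = cdTail ml (rs.filter (fun x => x != 0)) := by
  induction rs with
  | nil => simp [cdAbs, cdTail]
  | cons t rs ih =>
    have hS' : ∀ x ∈ rs, x = 1 ∨ x = -1 ∨ x = 0 := fun x hx => hS x (List.mem_cons_of_mem _ hx)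
    have ht := hS t (List.mem_cons_self ..)
    rcases ht with rfl | rfl | rfl
    · rw [List.filter_cons_of_pos (by norm_num), cdAbs, if_pos rfl, if_pos (le_refl (0:Int)),
        cdTail, cdRun, if_neg (by omega : ¬((1:Int) ≠ 1 ∨ (0:Int) ≥ ml))]
      by_cases hcap : (1:Int) ≥ ml
      · rw [if_pos (by rw [abs_of_nonneg (by omega : (0:Int) ≤ 0 + 1)]; omega),
          cdRun_of_cap _ _ _ _ (by omega)]
        norm_num
      · rw [if_neg (by rw [abs_of_nonneg (by omega : (0:Int) ≤ 0 + 1)]; omega),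
          show (0:Int) + 1 = 1 * 1 by ring,
          cdAbs_run ml rs hS' 1 (Or.inl rfl) 1 (by omega) (by omega)]
        norm_num
    · rw [List.filter_cons_of_pos (by norm_num), cdAbs, if_neg (by norm_num), if_pos rfl,
        if_pos (le_refl (0:Int)), cdTail, cdRun,
        if_neg (by omega : ¬((-1:Int) ≠ -1 ∨ (0:Int) ≥ ml))]
      by_cases hcap : (1:Int) ≥ ml
      · rw [if_pos (by rw [abs_of_nonpos (by omega : (0:Int) - 1 ≤ 0)]; omega),
          cdRun_of_cap _ _ _ _ (by omega)]
        norm_num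
      · rw [if_neg (by rw [abs_of_nonpos (by omega : (0:Int) - 1 ≤ 0)]; omega),
          show (0:Int) - 1 = -1 * 1 by ring,
          cdAbs_run ml rs hS' (-1) (Or.inr rfl) 1 (by omega) (by omega)]
        norm_num
    · rw [List.filter_cons_of_neg (by norm_num), cdAbs, if_neg (by norm_num),
        if_neg (by norm_num), if_neg (by rw [abs_zero]; omega)]
      exact ih hS'

-- A's index loop over range(j, 0, -1) equals cdAbs over the reversed first j diff signs.
lemma cdGo_eq_cdAbs (closes : List Int) (ml : Int) :
    ∀ j : Nat, j + 1 ≤ closes.length → ∀ c : Int,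
      cdGo closes ml (PySem.List.pyRange (j : Int) 0 (-1)) c =
        cdAbs ml (((cdSigns closes).take j).reverse) c := by
  intro j
  induction j with
  | zero => intro _ c; rw [PySem.List.pyRange_neg_one_eq_nil (by norm_num)]; rfl
  | succ j ih =>
    intro hj c
    have hlen := cdSigns_length closes
    have hjs : j < (cdSigns closes).length := by omega
    have hcast : ((j + 1 : Nat) : Int) = (j : Int) + 1 := by push_cast; ring
    rw [hcast, PySem.List.pyRange_neg_one_cons (by omega : (0:Int) < (j:Int) + 1)]
    have hcons : ((cdSigns closes).take (j + 1)).reverse =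
        (cdSigns closes)[j] :: ((cdSigns closes).take j).reverse := by
      rw [List.take_add_one, List.getElem?_eq_getElem hjs]
      simp
    rw [hcons]
    have hci : PySem.List.pyGetD closes ((j : Int) + 1) 0 = closes[j + 1]'(by omega) := by
      rw [show ((j : Int) + 1) = ((j + 1 : Nat) : Int) by omega,
        PySem.List.pyGetD_natCast]
      exact List.getD_eq_getElem _ _ _
    have hcp : PySem.List.pyGetD closes ((j : Int) + 1 - 1) 0 = closes[j]'(by omega) := by
      rw [show ((j : Int) + 1 - 1) = ((j : Nat) : Int) by omega,
        PySem.List.pyGetD_natCast]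
      exact List.getD_eq_getElem _ _ _
    have hrec : ∀ c' : Int, cdGo closes ml (PySem.List.pyRange ((j : Int) + 1 - 1) 0 (-1)) c' =
        cdAbs ml (((cdSigns closes).take j).reverse) c' := by
      intro c'
      rw [show ((j : Int) + 1 - 1) = ((j : Nat) : Int) by omega]
      exact ih (by omega) c'
    simp only [cdGo, cdAbs, hci, hcp, cdSigns_getElem closes j hjs]
    set a := closes[j]'(by omega) with ha
    set b := closes[j + 1]'(by omega) with hb
    rcases lt_trichotomy a b with hab | hab | hab
    · rw [show cdSign a b = 1 from by unfold cdSign; rw [if_pos hab, if_neg (by omega)]; ring]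
      split_ifs <;> first | rfl | exact hrec _ | (exfalso; omega)
    · rw [show cdSign a b = 0 from by unfold cdSign; rw [if_neg (by omega), if_neg (by omega)]; ring]
      split_ifs <;> first | rfl | exact hrec _ | (exfalso; omega)
    · rw [show cdSign a b = -1 from by unfold cdSign; rw [if_neg (by omega), if_pos hab]; ring]
      split_ifs <;> first | rfl | exact hrec _ | (exfalso; omega)

-- B's post-guard computation, written over the non-flat diff signs.
lemma alt_eq (closes : List Int) (ml : Int) (h : ¬ (closes.length : Int) < 3) :
    consecutive_direction_alt closes ml =
      cdTail ml (((cdSigns closes).filter (fun s => s != 0)).reverse) := by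
  unfold consecutive_direction_alt
  rw [if_neg h]
  show (match ((cdSigns closes).filter (fun s => s != 0)).getLast? with
    | none => (0:Int)
    | some last => last * cdRun last ml ((cdSigns closes).filter (fun s => s != 0)).reverse 0) = _
  rw [← List.head?_reverse]
  cases hrev : ((cdSigns closes).filter (fun s => s != 0)).reverse with
  | nil => rfl
  | cons s t => rfl

-- ===== VERDICT (by name: the statement is the Claim_ definition above) =====
theorem consecutive_direction_spec : Claim_equal_consecutive_direction := by
  intro closes ml _ hml
  unfold Spec_consecutive_direction consecutive_direction
  by_cases hlen : (closes.length : Int) < 3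
  · rw [if_pos hlen]
    unfold consecutive_direction_alt
    rw [if_pos hlen]
  · rw [if_neg hlen, alt_eq closes ml hlen]
    have hstep : ((closes.length : Int) - 1) = ((closes.length - 1 : Nat) : Int) := by
      omega
    rw [hstep, cdGo_eq_cdAbs closes ml (closes.length - 1) (by omega) 0,
      List.take_of_length_le (le_of_eq (cdSigns_length closes)),
      cdAbs_start ml hml _ (fun s hs => cdSigns_small closes s (List.mem_reverse.mp hs)),
      List.filter_reverse]
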